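-- pv_equiv track=rewrite | github.com/perambhargav123-lab/pbv-variance-analyzer-1 | app.py | classify_gl_code
-- ===== SOURCE A (Python) =====
-- SAP_GL_RANGES = [
--     (100000, 399999, "Skip"),           # 1–3xxxxx: Balance Sheet
--     (400000, 499999, "Revenue"),        # 4xxxxx
--     (500000, 599999, "COGS"),           # 5xxxxx
--     (600000, 699999, "_6x_ambiguous"),  # 6xxxxx: Employee or OpEx
--     (700000, 799999, "Depreciation"),   # 7xxxxx
--     (800000, 899999, "Finance"),        # 8xxxxx
--     (900000, 999999, "Other Income"),   # 9xxxxx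
-- ]
--
-- def classify_gl_code(gl_value):
--     """Return (category_str, is_balance_sheet) for a GL code value."""
--     try:
--         code = int(str(gl_value).strip())
--     except (ValueError, TypeError):
--         return None, False
--     for low, high, cat in SAP_GL_RANGES:
--         if low <= code <= high:
--             return cat, (cat == "Skip")
--     return None, False
-- ===== SOURCE B (Python) =====
-- _BUCKET_CATS = {
--     1: "Skip", 2: "Skip", 3: "Skip",
--     4: "Revenue", 5: "COGS", 6: "_6x_ambiguous",
--     7: "Depreciation", 8: "Finance", 9: "Other Income",
-- }
--
-- def classify_gl_code(gl_value):
--     """Return (category_str, is_balance_sheet) for a GL code value."""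
--     try:
--         code = int(str(gl_value).strip())
--     except (ValueError, TypeError):
--         return None, False
--     cat = _BUCKET_CATS.get(code // 100000)
--     if cat is None:
--         return None, False
--     return cat, cat == "Skip"
-- ===== Notes on version B (the rewrite author's own statement) =====
-- stated objective: simpler
-- what changed: Replaces the linear scan over the (low, high, category) range table with one floor division (code // 100000) and a single lookup in a constant bucket->category dict.
import Mathlib
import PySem

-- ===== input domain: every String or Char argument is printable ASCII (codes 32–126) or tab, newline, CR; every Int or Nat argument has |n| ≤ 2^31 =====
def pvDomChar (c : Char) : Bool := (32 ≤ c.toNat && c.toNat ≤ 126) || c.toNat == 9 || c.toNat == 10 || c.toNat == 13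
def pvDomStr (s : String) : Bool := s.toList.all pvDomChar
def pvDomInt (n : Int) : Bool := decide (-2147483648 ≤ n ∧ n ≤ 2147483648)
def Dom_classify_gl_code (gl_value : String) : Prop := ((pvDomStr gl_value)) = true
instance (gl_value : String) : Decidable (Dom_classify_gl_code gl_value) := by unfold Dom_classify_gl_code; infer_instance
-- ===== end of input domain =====

-- B replaces A's linear scan of the (low, high, category) range table by one floor
-- division (code // 100000) and a single lookup in a constant bucket -> category dict
-- (objective: simpler).


-- ===== PORT A =====
def SAP_GL_RANGES : List (Int × Int × String) :=
  [(100000, 399999, "Skip"),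
   (400000, 499999, "Revenue"),
   (500000, 599999, "COGS"),
   (600000, 699999, "_6x_ambiguous"),
   (700000, 799999, "Depreciation"),
   (800000, 899999, "Finance"),
   (900000, 999999, "Other Income")]

-- the for-loop with early return: scan the ranges in order
def scanRanges (code : Int) : List (Int × Int × String) → Option String × Bool
  | [] => (none, false)
  | (low, high, cat) :: rest =>
      if low ≤ code ∧ code ≤ high then (some cat, cat == "Skip")
      else scanRanges code rest

def classify_gl_code (gl_value : String) : Option String × Bool :=
  match PySem.Int.ofStr? (PySem.Str.strip gl_value) with
  | none => (none, false)
  | some code => scanRanges code SAP_GL_RANGES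

-- ===== PORT B =====
def BUCKET_CATS : PySem.Dict Int String :=
  PySem.Dict.ofList
  [(1, "Skip"), (2, "Skip"), (3, "Skip"),
   (4, "Revenue"), (5, "COGS"), (6, "_6x_ambiguous"),
   (7, "Depreciation"), (8, "Finance"), (9, "Other Income")]

def classify_gl_code_alt (gl_value : String) : Option String × Bool :=
  match PySem.Int.ofStr? (PySem.Str.strip gl_value) with
  | none => (none, false)
  | some code =>
      match PySem.Dict.get? BUCKET_CATS (PySem.Int.floordiv code 100000) with
      | none => (none, false)
      | some cat => (some cat, cat == "Skip")

-- ===== PRECONDITION & SPEC =====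
def Spec_classify_gl_code (gl_value : String) (out : Option String × Bool) : Prop := out = classify_gl_code_alt gl_value
instance (gl_value : String) (out : Option String × Bool) : Decidable (Spec_classify_gl_code gl_value out) := by unfold Spec_classify_gl_code; infer_instance

-- ===== CLAIM (what is proved, stated in full; the proofs are below) =====
def Claim_equal_classify_gl_code : Prop := ∀ (gl_value : String), Dom_classify_gl_code gl_value → Spec_classify_gl_code gl_value (classify_gl_code gl_value)

-- ===== LEMMAS AND PROOFS =====

-- core agreement: the range scan equals the bucket lookup, for every integer code
theorem scan_eq_bucket (code : Int) :
    scanRanges code SAP_GL_RANGES =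
      match PySem.Dict.get? BUCKET_CATS (PySem.Int.floordiv code 100000) with
      | none => (none, false)
      | some cat => (some cat, cat == "Skip") := by
  have hfd : PySem.Int.floordiv code 100000 = code / 100000 :=
    PySem.Int.floordiv_eq_ediv_of_pos (by norm_num)
  have hB : BUCKET_CATS = PySem.Dict.mk
      [(1, "Skip"), (2, "Skip"), (3, "Skip"),
       (4, "Revenue"), (5, "COGS"), (6, "_6x_ambiguous"),
       (7, "Depreciation"), (8, "Finance"), (9, "Other Income")] := by decide
  simp only [scanRanges, SAP_GL_RANGES, hfd, hB]
  by_cases h1 : 100000 ≤ code ∧ code ≤ 399999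
  · have : code / 100000 = 1 ∨ code / 100000 = 2 ∨ code / 100000 = 3 := by omega
    rcases this with h | h | h <;> simp [h1, h, PySem.Dict.get?_mk_cons]
  by_cases h2 : 400000 ≤ code ∧ code ≤ 499999
  · have h : code / 100000 = 4 := by omega
    simp [h1, h2, h, PySem.Dict.get?_mk_cons]
  by_cases h3 : 500000 ≤ code ∧ code ≤ 599999
  · have h : code / 100000 = 5 := by omega
    simp [h1, h2, h3, h, PySem.Dict.get?_mk_cons]
  by_cases h4 : 600000 ≤ code ∧ code ≤ 699999
  · have h : code / 100000 = 6 := by omega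
    simp [h1, h2, h3, h4, h, PySem.Dict.get?_mk_cons]
  by_cases h5 : 700000 ≤ code ∧ code ≤ 799999
  · have h : code / 100000 = 7 := by omega
    simp [h1, h2, h3, h4, h5, h, PySem.Dict.get?_mk_cons]
  by_cases h6 : 800000 ≤ code ∧ code ≤ 899999
  · have h : code / 100000 = 8 := by omega
    simp [h1, h2, h3, h4, h5, h6, h, PySem.Dict.get?_mk_cons]
  by_cases h7 : 900000 ≤ code ∧ code ≤ 999999
  · have h : code / 100000 = 9 := by omega
    simp [h1, h2, h3, h4, h5, h6, h7, h, PySem.Dict.get?_mk_cons]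
  · have hmiss : ∀ k : Int, 1 ≤ k → k ≤ 9 → ¬ ((k : Int) = code / 100000) := by
      intro k hk1 hk9 heq; omega
    simp [h1, h2, h3, h4, h5, h6, h7, PySem.Dict.get?,
          hmiss 1 (by norm_num) (by norm_num), hmiss 2 (by norm_num) (by norm_num),
          hmiss 3 (by norm_num) (by norm_num), hmiss 4 (by norm_num) (by norm_num),
          hmiss 5 (by norm_num) (by norm_num), hmiss 6 (by norm_num) (by norm_num),
          hmiss 7 (by norm_num) (by norm_num), hmiss 8 (by norm_num) (by norm_num),
          hmiss 9 (by norm_num) (by norm_num)]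

-- ===== VERDICT (by name: the statement is the Claim_ definition above) =====
theorem classify_gl_code_spec : Claim_equal_classify_gl_code := by
  intro gl_value _
  unfold Spec_classify_gl_code classify_gl_code classify_gl_code_alt
  cases PySem.Int.ofStr? (PySem.Str.strip gl_value) with
  | none => rfl
  | some code => exact scan_eq_bucket code
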